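-- pv_equiv track=rewrite | github.com/janicewym/FSRECP | work1/train_promptkgproto.py | get_type_max_num
-- ===== SOURCE A (Python) =====
-- def get_type_max_num(types_dict):
--     max_len = 0
--     types_set = set()
--     for types in types_dict.values():
--         if max_len < len(types):
--             max_len = len(types)
--         for t in types:
--             t = t.split('/')[-1]
--             types_set.add(t)
--     return max_len, types_set
-- ===== SOURCE B (Python) =====
-- def get_type_max_num(types_dict):
--     values = list(types_dict.values())
--     lengths = sorted((len(v) for v in values), reverse=True)
--     max_len = lengths[0] if lengths else 0
--     flat = sum(values, [])
--     types_set = {t.split('/')[-1] for t in flat}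
--     return max_len, types_set
-- ===== Notes on version B (the rewrite author's own statement) =====
-- stated objective: alternative
-- what changed: Replaces A's single fused loop (running maximum interleaved with incremental set insertion) by staged passes: the maximum is obtained by sorting the list of lengths descending and taking the first element, and the set is built in one shot from a flattened list produced by list concatenation, with no running state.
import Mathlib
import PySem

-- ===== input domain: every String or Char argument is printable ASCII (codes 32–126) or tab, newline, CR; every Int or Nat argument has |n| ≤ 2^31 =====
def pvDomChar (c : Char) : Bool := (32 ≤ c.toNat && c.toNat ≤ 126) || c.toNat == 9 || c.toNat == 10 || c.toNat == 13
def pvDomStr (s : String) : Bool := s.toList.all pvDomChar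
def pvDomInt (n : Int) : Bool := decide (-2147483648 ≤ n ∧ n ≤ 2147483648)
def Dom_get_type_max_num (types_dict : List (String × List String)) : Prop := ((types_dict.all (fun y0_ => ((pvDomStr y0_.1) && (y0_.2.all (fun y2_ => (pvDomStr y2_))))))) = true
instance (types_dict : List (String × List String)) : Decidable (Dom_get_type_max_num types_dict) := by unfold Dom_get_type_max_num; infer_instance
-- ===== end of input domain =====

-- B stages the work instead of A's fused loop: the maximum via a descending sort of the
-- lengths, the set in one shot from a concatenated flat list; objective: alternative.

-- t.split('/')[-1]: the separator "/" is nonempty so split? is always some, and the split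
-- is never an empty list so the [-1] index never raises; both getD defaults are unreachable.
def pvLastPart (t : String) : String :=
  (PySem.List.pyGet? ((PySem.Str.split? t "/").getD []) (-1)).getD ""

-- ===== PORT A =====
def get_type_max_num (types_dict : List (String × List String)) : Int × List String :=
  let st := types_dict.foldl
    (fun (st : Int × PySem.Set String) p =>
      let max_len := if st.1 < (p.2.length : Int) then (p.2.length : Int) else st.1
      let types_set := p.2.foldl (fun s t => PySem.Set.add s (pvLastPart t)) st.2
      (max_len, types_set))
    (0, PySem.Set.empty)
  (st.1, st.2)

-- ===== PORT B =====
def get_type_max_num_alt (types_dict : List (String × List String)) : Int × List String :=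
  let values := types_dict.map (fun p => p.2)
  let lengths := PySem.List.sorted (values.map (fun v => (v.length : Int))) (fun x => x) true
  -- 'lengths[0] if lengths else 0': the guard makes the [0] index total
  let max_len : Int := if lengths.isEmpty then 0 else (PySem.List.pyGet? lengths 0).getD 0
  let flat := values.foldl (fun acc v => acc ++ v) []
  let types_set := PySem.Set.ofList (flat.map pvLastPart)
  (max_len, types_set)

-- ===== PRECONDITION & SPEC =====
def Spec_get_type_max_num (types_dict : List (String × List String)) (out : Int × List String) : Prop := out = get_type_max_num_alt types_dict
instance (types_dict : List (String × List String)) (out : Int × List String) : Decidable (Spec_get_type_max_num types_dict out) := by unfold Spec_get_type_max_num; infer_instance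

-- ===== CLAIM =====
def Claim_equal_get_type_max_num : Prop := ∀ (types_dict : List (String × List String)), Dom_get_type_max_num types_dict → Spec_get_type_max_num types_dict (get_type_max_num types_dict)

-- ===== LEMMAS AND PROOFS =====

theorem pv_if_max (m a : Int) : (if m < a then a else m) = max m a := by
  rw [max_def]; split_ifs <;> omega

-- A's fused loop, split into its two independent components.
theorem pv_loop_eq (td : List (String × List String)) (m : Int) (s : PySem.Set String) :
    td.foldl
      (fun (st : Int × PySem.Set String) p =>
        (if st.1 < (p.2.length : Int) then (p.2.length : Int) else st.1,
         p.2.foldl (fun s t => PySem.Set.add s (pvLastPart t)) st.2))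
      (m, s)
    = ((td.map (fun p => (p.2.length : Int))).foldl max m,
       ((td.flatMap (fun p => p.2)).map pvLastPart).foldl PySem.Set.add s) := by
  induction td generalizing m s with
  | nil => rfl
  | cons p td ih =>
      simp only [List.foldl_cons, List.map_cons, List.flatMap_cons, List.map_append,
        List.foldl_append, List.foldl_map, ih]
      simp [pv_if_max]

-- a running max starting at a is m, whenever m bounds the list, a ≤ m, and m is a or a member
theorem pv_foldl_max_eq (L : List Int) (a m : Int)
    (hub : ∀ x ∈ L, x ≤ m) (ha : a ≤ m) (hmem : m ∈ L ∨ m = a) :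
    L.foldl max a = m := by
  induction L generalizing a with
  | nil =>
      rcases hmem with h | h
      · exact absurd h (List.not_mem_nil)
      · simp [h]
  | cons x L ih =>
      have hx : x ≤ m := hub x (List.mem_cons_self)
      simp only [List.foldl_cons]
      refine ih (max a x) (fun y hy => hub y (List.mem_cons_of_mem _ hy)) (max_le ha hx) ?_
      rcases hmem with h | h
      · rcases List.mem_cons.mp h with h | h
        · right; simp [h, max_eq_right (h ▸ ha)]
        · left; exact h
      · right; simp [max_eq_left (h ▸ hx), h]

theorem pv_max_side (td : List (String × List String)) :
    (td.map (fun p => (p.2.length : Int))).foldl max 0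
      = (let lengths := PySem.List.sorted ((td.map (fun p => p.2)).map (fun v => (v.length : Int))) (fun x => x) true
         if lengths.isEmpty then 0 else (PySem.List.pyGet? lengths 0).getD 0) := by
  set L := td.map (fun p => (p.2.length : Int)) with hL
  have hmap : (td.map (fun p => p.2)).map (fun v => (v.length : Int)) = L := by
    simp [hL, List.map_map]
  rw [hmap]
  rcases hs : PySem.List.sorted L (fun x => x) true with _ | ⟨m, t⟩
  · have : L = [] := (PySem.List.sorted_eq_nil_iff L (fun x => x) true).mp hs
    simp [this]
  · have hub : ∀ y ∈ L, y ≤ m := PySem.List.key_head_sorted_rev_ge L (fun x => x) hs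
    have hmem : m ∈ L := by
      have : m ∈ PySem.List.sorted L (fun x => x) true := by simp [hs]
      exact (PySem.List.mem_sorted L (fun x => x) true m).mp this
    have hnn : (0 : Int) ≤ m := by
      rcases List.mem_map.mp (hL ▸ hmem) with ⟨p, _, hp⟩
      omega
    have := pv_foldl_max_eq L 0 m hub hnn (Or.inl hmem)
    simp [this, PySem.List.pyGet?, PySem.List.pyIdx?]

-- ===== VERDICT =====
theorem get_type_max_num_spec : Claim_equal_get_type_max_num := by
  intro td _
  show get_type_max_num td = get_type_max_num_alt td
  simp only [get_type_max_num, get_type_max_num_alt, PySem.Set.ofList_eq_foldl,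
    PySem.Set.empty, pv_loop_eq]
  rw [PySem.List.foldl_append_eq_flatMap]
  simp only [List.nil_append, List.flatMap_map]
  rw [pv_max_side]
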